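-- pv_equiv track=rewrite | github.com/Sohagsrz/bup_ctf_2025 | Mal/solve_correct.py | get_prev_hashes_correct
-- ===== SOURCE A (Python) =====
-- def get_prev_hashes_correct(current_hash):
--     """Correct reverse: handle all possible k values in modulo arithmetic"""
--     results = []
--
--     for char_val in range(32, 127):
--         diff = (current_hash - char_val) % (2**32)
--
--         # We need: prev * 33 = diff + k * 2^32 for some integer k
--         # Try different k values (0 to 32 should be enough)
--         for k in range(33):
--             candidate = diff + k * (2**32)
--             if candidate % 33 == 0:
--                 prev_hash = (candidate // 33) & 0xFFFFFFFF
--                 # Verify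
--                 verify = ((prev_hash * 33 + char_val) & 0xFFFFFFFF)
--                 if verify == current_hash:
--                     results.append((prev_hash, chr(char_val)))
--                     break  # Found one solution for this char
--
--     return results
-- ===== SOURCE B (Python) =====
-- def get_prev_hashes_correct(current_hash):
--     """Direct reverse of one djb2 step via the modular inverse of 33 mod 2**32.
--
--     A 32-bit hash state lies in [0, 2**32); outside that range no 32-bit
--     predecessor can verify, so the result is empty there."""
--     if not (0 <= current_hash < 2**32):
--         return []
--     inv33 = 1041204193  # = pow(33, -1, 2**32)
--     return [(((current_hash - char_val) * inv33) % (2**32), chr(char_val))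
--             for char_val in range(32, 127)]
-- ===== Notes on version B (the rewrite author's own statement) =====
-- stated objective: faster
-- what changed: Replaces A's per-character search over 33 candidate k values (with trial division and a verify step) by a single closed-form modular multiplication with the precomputed inverse of 33 mod 2**32, with one up-front range check instead of A's per-candidate verify.
import Mathlib
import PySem

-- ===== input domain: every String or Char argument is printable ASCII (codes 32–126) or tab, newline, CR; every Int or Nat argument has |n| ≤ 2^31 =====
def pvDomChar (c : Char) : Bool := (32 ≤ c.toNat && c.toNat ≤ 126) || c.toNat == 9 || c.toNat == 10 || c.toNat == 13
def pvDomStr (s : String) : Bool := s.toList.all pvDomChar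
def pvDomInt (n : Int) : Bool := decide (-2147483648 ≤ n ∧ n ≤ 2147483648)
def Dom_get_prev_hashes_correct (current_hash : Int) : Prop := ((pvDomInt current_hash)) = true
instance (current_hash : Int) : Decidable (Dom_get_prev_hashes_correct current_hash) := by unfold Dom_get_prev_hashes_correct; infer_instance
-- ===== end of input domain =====

-- B replaces A's per-character 33-candidate search by one closed-form multiplication with the inverse of 33 mod 2^32 (fewer big-int operations per character).

-- chr(n): exact for the codes 32..126 used here (single printable ASCII char)
def pyChr (n : Int) : String := String.ofList [Char.ofNat n.toNat]

-- ===== PORT A =====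
-- inner 'for k in range(33): … break' loop, returning the prev_hash appended at the break (if any)
def innerSearch (current_hash diff char_val : Int) : List Int → Option Int
  | [] => none
  | k :: ks =>
    let candidate := diff + k * 4294967296
    if PySem.Int.mod candidate 33 = 0 then
      let prev_hash := PySem.Int.band (PySem.Int.floordiv candidate 33) 4294967295
      let verify := PySem.Int.band (prev_hash * 33 + char_val) 4294967295
      if verify = current_hash then some prev_hash
      else innerSearch current_hash diff char_val ks
    else innerSearch current_hash diff char_val ks

def get_prev_hashes_correct (current_hash : Int) : List (Int × String) :=
  (PySem.List.pyRange 32 127 1).foldl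
    (fun results char_val =>
      let diff := PySem.Int.mod (current_hash - char_val) 4294967296
      match innerSearch current_hash diff char_val (PySem.List.pyRange 0 33 1) with
      | some prev_hash => results ++ [(prev_hash, pyChr char_val)]
      | none => results)
    []

-- ===== PORT B =====
def get_prev_hashes_correct_alt (current_hash : Int) : List (Int × String) :=
  if 0 ≤ current_hash ∧ current_hash < 4294967296 then
    (PySem.List.pyRange 32 127 1).map
      (fun char_val =>
        (PySem.Int.mod ((current_hash - char_val) * 1041204193) 4294967296, pyChr char_val))
  else []

-- ===== PRECONDITION & SPEC =====
def Spec_get_prev_hashes_correct (current_hash : Int) (out : List (Int × String)) : Prop := out = get_prev_hashes_correct_alt current_hash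
instance (current_hash : Int) (out : List (Int × String)) : Decidable (Spec_get_prev_hashes_correct current_hash out) := by unfold Spec_get_prev_hashes_correct; infer_instance

-- ===== CLAIM (what is proved, stated in full; the proofs are below) =====
def Claim_equal_get_prev_hashes_correct : Prop := ∀ (current_hash : Int), Dom_get_prev_hashes_correct current_hash → Spec_get_prev_hashes_correct current_hash (get_prev_hashes_correct current_hash)

-- ===== LEMMAS AND PROOFS =====

-- x & 0xFFFFFFFF = x % 2^32 for 0 ≤ x
theorem band_mask_eq_emod (x : Int) (hx : 0 ≤ x) :
    PySem.Int.band x 4294967295 = x % 4294967296 := by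
  rw [PySem.Int.band_of_nonneg hx (by norm_num)]
  have h1 : (4294967295 : Int).toNat = 4294967295 := rfl
  rw [h1]
  have h2 : x.toNat &&& 4294967295 = x.toNat % 4294967296 := by
    have e : (4294967295 : Nat) = 2 ^ 32 - 1 := by norm_num
    rw [e, Nat.and_two_pow_sub_one_eq_mod]
  rw [h2]
  omega

-- the successful inner step: at any k ≥ 0 with 33 ∣ diff + k·2^32, prev_hash is B's
-- closed-form value and the verify equals current_hash % 2^32  (33 · 1041204193 = 8·2^32 + 1)
theorem step_values (h c k : Int) (hk : 0 ≤ k) (hc : 32 ≤ c)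
    (hdvd : (33 : Int) ∣ (h - c) % 4294967296 + k * 4294967296) :
    PySem.Int.band
        (PySem.Int.floordiv ((h - c) % 4294967296 + k * 4294967296) 33) 4294967295
      = PySem.Int.mod ((h - c) * 1041204193) 4294967296 ∧
    PySem.Int.band
        (PySem.Int.mod ((h - c) * 1041204193) 4294967296 * 33 + c) 4294967295
      = h % 4294967296 := by
  obtain ⟨q, hq⟩ := hdvd
  have hD0 : 0 ≤ (h - c) % 4294967296 := Int.emod_nonneg _ (by norm_num)
  have hdiv : PySem.Int.floordiv ((h - c) % 4294967296 + k * 4294967296) 33 = q := by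
    rw [PySem.Int.floordiv_eq_ediv_of_pos (by norm_num), hq]
    exact Int.mul_ediv_cancel_left q (by norm_num)
  have hq0 : 0 ≤ q := by omega
  have hprev : q % 4294967296 = ((h - c) * 1041204193) % 4294967296 := by
    have e1 : Int.ModEq 4294967296 (33 * q) (h - c) := by
      unfold Int.ModEq; omega
    have e2 : Int.ModEq 4294967296 (33 * q * 1041204193) ((h - c) * 1041204193) :=
      e1.mul_right _
    have e3 : Int.ModEq 4294967296 q (33 * q * 1041204193) := by
      unfold Int.ModEq
      rw [show (33 * q * 1041204193 : Int) = q + 4294967296 * (8 * q) by ring]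
      omega
    exact e3.trans e2
  have hmodP : PySem.Int.mod ((h - c) * 1041204193) 4294967296
      = ((h - c) * 1041204193) % 4294967296 :=
    PySem.Int.mod_eq_emod_of_pos (by norm_num)
  have hT0 : 0 ≤ ((h - c) * 1041204193) % 4294967296 := Int.emod_nonneg _ (by norm_num)
  constructor
  · rw [hdiv, band_mask_eq_emod q hq0, hprev, hmodP]
  · rw [hmodP, band_mask_eq_emod _ (by omega)]
    omega

-- one cons step of the inner loop when k succeeds: the break fires with B's value
theorem innerSearch_cons_found (h c k : Int) (ks : List Int)
    (hh : 0 ≤ h ∧ h < 4294967296) (hc : 32 ≤ c) (hk : 0 ≤ k)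
    (hdvd : (33 : Int) ∣ (h - c) % 4294967296 + k * 4294967296) :
    innerSearch h (PySem.Int.mod (h - c) 4294967296) c (k :: ks)
      = some (PySem.Int.mod ((h - c) * 1041204193) 4294967296) := by
  have hDmod : PySem.Int.mod (h - c) 4294967296 = (h - c) % 4294967296 :=
    PySem.Int.mod_eq_emod_of_pos (by norm_num)
  obtain ⟨hval, hver⟩ := step_values h c k hk hc hdvd
  have hcond : PySem.Int.mod ((h - c) % 4294967296 + k * 4294967296) 33 = 0 := by
    rw [PySem.Int.mod_eq_zero_iff_dvd]; exact hdvd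
  have hver' : PySem.Int.band
      (PySem.Int.band (PySem.Int.floordiv ((h - c) % 4294967296 + k * 4294967296) 33)
        4294967295 * 33 + c) 4294967295 = h := by
    rw [hval, hver]; omega
  simp only [innerSearch, hDmod]
  rw [if_pos hcond, if_pos hver', hval]

-- one cons step of the inner loop when k does not append: either the candidate is not
-- divisible, or the verify (= current_hash % 2^32) misses an out-of-range current_hash
theorem innerSearch_cons_skip (h c k : Int) (ks : List Int) (hc : 32 ≤ c) (hk : 0 ≤ k)
    (hcase : ¬ (33 : Int) ∣ (h - c) % 4294967296 + k * 4294967296 ∨ (h < 0 ∨ 4294967296 ≤ h)) :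
    innerSearch h (PySem.Int.mod (h - c) 4294967296) c (k :: ks)
      = innerSearch h (PySem.Int.mod (h - c) 4294967296) c ks := by
  have hDmod : PySem.Int.mod (h - c) 4294967296 = (h - c) % 4294967296 :=
    PySem.Int.mod_eq_emod_of_pos (by norm_num)
  by_cases hdvd : (33 : Int) ∣ (h - c) % 4294967296 + k * 4294967296
  · have hh : h < 0 ∨ 4294967296 ≤ h := by tauto
    obtain ⟨hval, hver⟩ := step_values h c k hk hc hdvd
    have hcond : PySem.Int.mod ((h - c) % 4294967296 + k * 4294967296) 33 = 0 := by
      rw [PySem.Int.mod_eq_zero_iff_dvd]; exact hdvd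
    have hver' : ¬ PySem.Int.band
        (PySem.Int.band (PySem.Int.floordiv ((h - c) % 4294967296 + k * 4294967296) 33)
          4294967295 * 33 + c) 4294967295 = h := by
      rw [hval, hver]
      have h1 := Int.emod_nonneg h (show (4294967296:Int) ≠ 0 by norm_num)
      have h2 := Int.emod_lt_of_pos h (show (0:Int) < 4294967296 by norm_num)
      omega
    simp only [innerSearch, hDmod]
    rw [if_pos hcond, if_neg hver', ← hDmod]
  · have hcond : ¬ PySem.Int.mod ((h - c) % 4294967296 + k * 4294967296) 33 = 0 := by
      rw [PySem.Int.mod_eq_zero_iff_dvd]; exact hdvd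
    simp only [innerSearch, hDmod]
    rw [if_neg hcond, ← hDmod]

-- in range [0, 2^32): the inner search returns B's closed-form value as soon as the
-- remaining k-list still contains a divisible k (the verify then always succeeds)
theorem innerSearch_some (h c : Int) (hh : 0 ≤ h ∧ h < 4294967296) (hc : 32 ≤ c) :
    ∀ ks : List Int, (∀ k ∈ ks, 0 ≤ k) →
      (∃ k ∈ ks, (33 : Int) ∣ (h - c) % 4294967296 + k * 4294967296) →
      innerSearch h (PySem.Int.mod (h - c) 4294967296) c ks
        = some (PySem.Int.mod ((h - c) * 1041204193) 4294967296) := by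
  intro ks
  induction ks with
  | nil => intro _ hex; obtain ⟨k, hk, _⟩ := hex; exact absurd hk (List.not_mem_nil)
  | cons k ks ih =>
    intro hpos hex
    by_cases hdvd : (33 : Int) ∣ (h - c) % 4294967296 + k * 4294967296
    · exact innerSearch_cons_found h c k ks hh hc (hpos k List.mem_cons_self) hdvd
    · rw [innerSearch_cons_skip h c k ks hc (hpos k List.mem_cons_self) (Or.inl hdvd)]
      apply ih (fun x hx => hpos x (List.mem_cons_of_mem _ hx))
      obtain ⟨k', hk', hd'⟩ := hex
      rcases List.mem_cons.mp hk' with rfl | hmem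
      · exact absurd hd' hdvd
      · exact ⟨k', hmem, hd'⟩

-- out of range: the verify never equals current_hash, so the break never fires
theorem innerSearch_none (h c : Int) (hh : h < 0 ∨ 4294967296 ≤ h) (hc : 32 ≤ c) :
    ∀ ks : List Int, (∀ k ∈ ks, 0 ≤ k) →
      innerSearch h (PySem.Int.mod (h - c) 4294967296) c ks = none := by
  intro ks
  induction ks with
  | nil => intro _; rfl
  | cons k ks ih =>
    intro hpos
    rw [innerSearch_cons_skip h c k ks hc (hpos k List.mem_cons_self) (Or.inr hh)]
    exact ih (fun x hx => hpos x (List.mem_cons_of_mem _ hx))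

-- a divisible k always exists in range(33)  (2^32 ≡ 4 mod 33 and 4·8 ≡ -1 mod 33)
theorem exists_divisible_k (h c : Int) :
    ∃ k ∈ PySem.List.pyRange 0 33 1,
      (33 : Int) ∣ (h - c) % 4294967296 + k * 4294967296 := by
  refine ⟨(8 * ((h - c) % 4294967296)) % 33, ?_, ?_⟩
  · rw [PySem.List.mem_pyRange_one]
    exact ⟨Int.emod_nonneg _ (by norm_num), Int.emod_lt_of_pos _ (by norm_num)⟩
  · omega

-- ===== VERDICT (by name: the statement is the Claim_ definition above) =====
theorem get_prev_hashes_correct_spec : Claim_equal_get_prev_hashes_correct := by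
  unfold Claim_equal_get_prev_hashes_correct
  intro h _
  unfold Spec_get_prev_hashes_correct get_prev_hashes_correct get_prev_hashes_correct_alt
  by_cases hh : 0 ≤ h ∧ h < 4294967296
  · rw [if_pos hh]
    rw [PySem.List.foldl_congr_mem (PySem.List.pyRange 32 127 1) _
      (fun results c => results ++ [(PySem.Int.mod ((h - c) * 1041204193) 4294967296, pyChr c)]) []
      (by
        intro acc c hcmem
        have hc := (PySem.List.mem_pyRange_one.mp hcmem).1
        simp only
        rw [innerSearch_some h c hh hc (PySem.List.pyRange 0 33 1)
          (fun k hk => (PySem.List.mem_pyRange_one.mp hk).1)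
          (exists_divisible_k h c)])]
    rw [PySem.List.foldl_append_singleton_eq_map]
    simp
  · rw [if_neg hh]
    rw [PySem.List.foldl_congr_mem (PySem.List.pyRange 32 127 1) _
      (fun results _ => results) []
      (by
        intro acc c hcmem
        have hc := (PySem.List.mem_pyRange_one.mp hcmem).1
        simp only
        rw [innerSearch_none h c (by omega) hc (PySem.List.pyRange 0 33 1)
          (fun k hk => (PySem.List.mem_pyRange_one.mp hk).1)])]
    induction (PySem.List.pyRange 32 127 1) with
    | nil => rfl
    | cons a l ih => exact ih
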